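-- pv_equiv track=rewrite | github.com/byrony/LeetCode | 541. Reverse_String_II.py | reverseStr
-- ===== SOURCE A (Python) =====
-- def reverseStr(s, k):
--     """
--     :type s: str
--     :type k: int
--     :rtype: str
--     """
--     s = list(s)
--     num_k = len(s) // k
--     for i in range(num_k):
--         if i%2 == 0:
--             s[k*i:k*(i+1)] = s[k*i:k*(i+1)][::-1]
--     # check the less than k character left
--     if num_k % 2 == 0:
--         s[num_k*k : ] = s[num_k*k : ][::-1]
--     elif num_k % 2 == 1:
--         pass
--     return ''.join(s)
-- ===== SOURCE B (Python) =====
-- def reverseStr(s, k):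
--     """
--     :type s: str
--     :type k: int
--     :rtype: str
--     """
--     n = len(s)
--     w = 2 * k
--
--     def pick(i):
--         start = w * (i // w)
--         end = min(start + k, n)
--         return s[start + end - 1 - i] if i < end else s[i]
--
--     return ''.join(pick(i) for i in range(n))
-- ===== Notes on version B (the rewrite author's own statement) =====
-- stated objective: alternative
-- what changed: A mutates a char list by reversing slices in place (k-block loop with an i%2 parity test plus a separate tail step); B never reverses or mutates anything: it computes, for each output position i, the source index by closed-form arithmetic (start = 2k*(i//2k), end = min(start+k, n), mirrored index start+end-1-i when i falls in the reversed half) and gathers the characters in a single comprehension.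
-- outside the precondition, e.g. on reverseStr('abcde', -2): A returns 'abcde', B returns 'aecde'
import Mathlib
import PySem

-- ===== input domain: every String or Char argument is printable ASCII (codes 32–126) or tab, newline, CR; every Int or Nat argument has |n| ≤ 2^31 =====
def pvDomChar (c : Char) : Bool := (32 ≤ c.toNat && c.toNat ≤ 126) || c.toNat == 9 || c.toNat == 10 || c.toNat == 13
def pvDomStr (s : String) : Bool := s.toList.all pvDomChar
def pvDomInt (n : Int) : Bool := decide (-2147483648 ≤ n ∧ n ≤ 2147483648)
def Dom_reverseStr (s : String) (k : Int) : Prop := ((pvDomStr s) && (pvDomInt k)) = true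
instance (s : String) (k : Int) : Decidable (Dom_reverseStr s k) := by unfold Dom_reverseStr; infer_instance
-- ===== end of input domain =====

-- B replaces A's in-place slice reversals (k-block loop with an i%2 parity test plus a
-- separate tail step) by a mutation-free gather: each output character is fetched from a
-- source index computed in closed form.

-- Python step-1 slice assignment `l[a:b] = l[a:b][::-1]` (used by port A).
-- Exact: result = l[:a'] ++ reversed slice ++ l[max(a',b'):] with a', b' the clamped bounds.
def pyRevSliceTo (l : List Char) (a b : Int) : List Char :=
  l.take (PySem.List.clampIdx l.length a)
    ++ (PySem.List.slice l (some a) (some b)).reverse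
    ++ l.drop (max (PySem.List.clampIdx l.length a) (PySem.List.clampIdx l.length b))

-- Python `l[a:] = l[a:][::-1]`. Exact for the same reason.
def pyRevSliceFrom (l : List Char) (a : Int) : List Char :=
  l.take (PySem.List.clampIdx l.length a)
    ++ (PySem.List.slice l (some a) none).reverse
    ++ l.drop (max (PySem.List.clampIdx l.length a) l.length)

-- ===== PORT A =====
def reverseStr (s : String) (k : Int) : String :=
  let l := s.toList
  let numK := PySem.Int.floordiv (l.length : Int) k
  let l2 := (PySem.List.pyRange 0 numK 1).foldl
    (fun acc i => if PySem.Int.mod i 2 == 0 then pyRevSliceTo acc (k * i) (k * (i + 1)) else acc) l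
  let l3 := if PySem.Int.mod numK 2 == 0 then pyRevSliceFrom l2 (numK * k) else l2
  String.ofList l3

-- ===== PORT B =====
-- `s[idx]` is ported with pyGetD: under Pre_ (1 ≤ k) the computed index is always in range.
def reverseStr_alt (s : String) (k : Int) : String :=
  let l := s.toList
  let n : Int := (l.length : Int)
  let w : Int := 2 * k
  String.ofList ((PySem.List.pyRange 0 n 1).map (fun i =>
    let start := w * (PySem.Int.floordiv i w)
    let e := min (start + k) n
    if i < e then PySem.List.pyGetD l (start + e - 1 - i) ' '
    else PySem.List.pyGetD l i ' '))

-- ===== PRECONDITION & SPEC =====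
-- Pre_ restricts to the problem's natural domain k ≥ 1 (LeetCode 541 specifies k ≥ 1):
-- k = 0 makes A raise ZeroDivisionError, and negative k is outside the task's meaning,
-- so B does not mirror A's accidental no-op there.
def Pre_reverseStr (s : String) (k : Int) : Prop := 1 ≤ k
instance (s : String) (k : Int) : Decidable (Pre_reverseStr s k) := by unfold Pre_reverseStr; infer_instance
def pvWitness_reverseStr : String × Int := ("abcdefg", 2)

def Spec_reverseStr (s : String) (k : Int) (out : String) : Prop := out = reverseStr_alt s k
instance (s : String) (k : Int) (out : String) : Decidable (Spec_reverseStr s k out) := by unfold Spec_reverseStr; infer_instance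

-- ===== CLAIM (what is proved, stated in full; the proofs are below) =====
def Claim_equal_reverseStr : Prop := ∀ (s : String) (k : Int), Dom_reverseStr s k → Pre_reverseStr s k → Spec_reverseStr s k (reverseStr s k)

-- ===== LEMMAS AND PROOFS =====

def revSeg (w : Nat) (l : List Char) : List Char := (l.take w).reverse ++ l.drop w

lemma op_to_nat (l : List Char) (c w : Nat) :
    pyRevSliceTo l (c : Int) ((c : Int) + (w : Int)) = l.take c ++ revSeg w (l.drop c) := by
  unfold pyRevSliceTo revSeg
  have hc2 : PySem.List.clampIdx l.length ((c : Int) + (w : Int)) = min (c + w) l.length := by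
    rw [show ((c : Int) + (w : Int)) = ((c + w : Nat) : Int) by push_cast; ring,
        PySem.List.clampIdx_natCast]
  rw [PySem.List.slice_natCast_add, PySem.List.clampIdx_natCast, hc2]
  by_cases hc : c ≤ l.length
  · rw [show min c l.length = c by omega,
        show max c (min (c + w) l.length) = min (c + w) l.length by omega]
    rw [List.append_assoc]
    congr 2
    rw [List.drop_drop]
    by_cases hw : c + w ≤ l.length
    · rw [show min (c + w) l.length = c + w by omega]
    · rw [show min (c + w) l.length = l.length by omega, List.drop_length]
      exact (List.drop_eq_nil_of_le (by omega)).symm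
  · rw [show min c l.length = l.length by omega,
        show max l.length (min (c + w) l.length) = l.length by omega,
        List.drop_length, List.take_length]
    have h3 : l.drop c = [] := List.drop_eq_nil_of_le (by omega)
    rw [h3, List.take_of_length_le (show l.length ≤ c by omega)]
    simp

lemma op_from_nat (l : List Char) (c : Nat) :
    pyRevSliceFrom l (c : Int) = l.take c ++ (l.drop c).reverse := by
  unfold pyRevSliceFrom
  rw [PySem.List.slice_from l (by positivity), PySem.List.clampIdx_natCast,
      show max (min c l.length) l.length = l.length by omega, List.drop_length,
      Int.toNat_natCast]
  by_cases hc : c ≤ l.length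
  · rw [show min c l.length = c by omega]; simp
  · rw [show min c l.length = l.length by omega, List.take_length,
        List.drop_eq_nil_of_le (by omega), List.take_of_length_le (by omega)]
    simp

lemma op_to_int (l : List Char) (i : Int) (hi : 0 ≤ i) (w : Nat) :
    pyRevSliceTo l i (i + (w : Int)) = l.take i.toNat ++ revSeg w (l.drop i.toNat) := by
  have := op_to_nat l i.toNat w
  rwa [Int.toNat_of_nonneg hi] at this

lemma op_from_int (l : List Char) (a : Int) (ha : 0 ≤ a) :
    pyRevSliceFrom l a = l.take a.toNat ++ (l.drop a.toNat).reverse := by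
  have := op_from_nat l a.toNat
  rwa [Int.toNat_of_nonneg ha] at this

lemma fold_shift_gen (w c : Nat) (P : Int → Bool) (a : Int → Int)
    (r : List Int) (ha : ∀ j ∈ r, 0 ≤ a j) :
    ∀ (u v : List Char), u.length = c →
    r.foldl (fun acc j => if P j then pyRevSliceTo acc ((c : Int) + a j) ((c : Int) + a j + (w : Int)) else acc) (u ++ v)
    = u ++ r.foldl (fun acc j => if P j then pyRevSliceTo acc (a j) (a j + (w : Int)) else acc) v := by
  induction r with
  | nil => intro u v hu; simp
  | cons j r ih =>
    intro u v hu
    simp only [List.foldl_cons]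
    have hj : 0 ≤ a j := ha j (by simp)
    have step : (if P j then pyRevSliceTo (u ++ v) ((c : Int) + a j) ((c : Int) + a j + (w : Int)) else u ++ v)
        = u ++ (if P j then pyRevSliceTo v (a j) (a j + (w : Int)) else v) := by
      by_cases hP : P j
      · simp only [hP, if_pos]
        rw [op_to_int _ _ (by omega), op_to_int _ _ hj,
            show ((c : Int) + a j).toNat = c + (a j).toNat by omega,
            List.take_append, List.drop_append, hu,
            List.take_of_length_le (by omega), List.drop_eq_nil_of_le (by omega),
            show c + (a j).toNat - c = (a j).toNat by omega]
        simp
      · simp [hP]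
    rw [step, ih (fun x hx => ha x (by simp [hx])) u _ hu]

lemma take_revSeg (K : Nat) (l : List Char) :
    (revSeg (K + 1) l).take (2 * (K + 1)) = (l.take (K + 1)).reverse ++ (l.drop (K + 1)).take (K + 1) := by
  unfold revSeg
  rw [List.take_append, List.take_of_length_le (by simp <;> omega)]
  congr 1
  by_cases hn : K + 1 ≤ l.length
  · congr 1; simp <;> omega
  · rw [List.drop_eq_nil_of_le (by omega)]; simp

lemma drop_revSeg (K : Nat) (l : List Char) :
    (revSeg (K + 1) l).drop (2 * (K + 1)) = l.drop (2 * (K + 1)) := by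
  unfold revSeg
  rw [List.drop_append, List.drop_eq_nil_of_le (by simp <;> omega), List.nil_append,
      List.drop_drop]
  by_cases hn : K + 1 ≤ l.length
  · congr 1; simp <;> omega
  · rw [List.drop_eq_nil_of_le (by simp <;> omega), List.drop_eq_nil_of_le (by omega)]

lemma pyRange_pos_nil (a b s : Int) (hs : 0 < s) (h : b ≤ a) :
    PySem.List.pyRange a b s = [] := by
  rw [PySem.List.pyRange_of_pos a b hs]
  simp [show ¬ a < b by omega]

lemma pyRange_pos_cons (a b s : Int) (hs : 0 < s) (h : a < b) :
    PySem.List.pyRange a b s = a :: PySem.List.pyRange (a + s) b s := by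
  rw [PySem.List.pyRange_of_pos a b hs, PySem.List.pyRange_of_pos (a+s) b hs]
  by_cases h2 : a + s < b
  · simp only [if_pos h, if_pos h2]
    have hcnt : ((b - a + s - 1) / s).toNat = ((b - (a + s) + s - 1) / s).toNat + 1 := by
      have e1 : b - a + s - 1 = (b - (a + s) + s - 1) + 1 * s := by ring
      rw [e1, Int.add_mul_ediv_right _ _ (by omega : s ≠ 0)]
      have : 0 ≤ (b - (a + s) + s - 1) / s := Int.ediv_nonneg (by omega) (by omega)
      omega
    rw [hcnt, List.range_succ_eq_map]
    simp only [List.map_cons, List.map_map]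
    have hf : ((fun (k : Nat) => a + s * (k : Int)) ∘ Nat.succ) = fun (k : Nat) => a + s + s * (k : Int) := by
      funext k; simp only [Function.comp]; push_cast; ring
    rw [hf]; simp
  · simp only [if_pos h, if_neg h2]
    have hcnt : ((b - a + s - 1) / s).toNat = 1 := by
      have h1 : (b - a + s - 1) / s = 1 := by
        rw [Int.ediv_eq_iff_of_pos] <;> omega
      omega
    rw [hcnt]
    simp

lemma pyRange_shift (c a b s : Int) (hs : 0 < s) :
    PySem.List.pyRange (a + c) (b + c) s = (PySem.List.pyRange a b s).map (fun x => c + x) := by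
  rw [PySem.List.pyRange_of_pos _ _ hs, PySem.List.pyRange_of_pos a b hs]
  have e : b + c - (a + c) = b - a := by ring
  simp only [add_lt_add_iff_right, e, List.map_map]
  apply List.map_congr_left
  intro k _
  simp only [Function.comp]; ring

lemma op_from_shift (c : Nat) (a : Int) (ha : 0 ≤ a) (u v : List Char) (hu : u.length = c) :
    pyRevSliceFrom (u ++ v) ((c : Int) + a) = u ++ pyRevSliceFrom v a := by
  rw [op_from_int _ _ (by omega), op_from_int _ _ ha,
      show ((c : Int) + a).toNat = c + a.toNat by omega,
      List.take_append, List.drop_append, hu,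
      List.take_of_length_le (by omega), List.drop_eq_nil_of_le (by omega),
      show c + a.toNat - c = a.toNat by omega]
  simp

def chunkRev (K : Nat) (l : List Char) : List Char :=
  if h : l = [] then []
  else (l.take (K + 1)).reverse ++ (l.drop (K + 1)).take (K + 1) ++ chunkRev K (l.drop (2 * (K + 1)))
termination_by l.length
decreasing_by
  have : 0 < l.length := List.length_pos_iff.mpr h
  simp only [List.length_drop]; omega

lemma chunkRev_nil (K : Nat) : chunkRev K [] = [] := by
  rw [chunkRev]; simp

lemma chunkRev_small (K : Nat) (l : List Char) (h : l.length ≤ 2 * (K + 1)) :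
    chunkRev K l = revSeg (K + 1) l := by
  by_cases hl : l = []
  · subst hl; rw [chunkRev_nil]; simp [revSeg]
  · rw [chunkRev]
    simp only [hl, dite_false]
    rw [show l.drop (2 * (K + 1)) = [] from List.drop_eq_nil_of_le (by omega), chunkRev_nil]
    unfold revSeg
    rw [List.take_of_length_le (show (l.drop (K + 1)).length ≤ K + 1 by
          rw [List.length_drop]; omega)]
    simp

lemma chunkRev_step (K : Nat) (l : List Char) (h : l ≠ []) :
    chunkRev K l = (revSeg (K + 1) l).take (2 * (K + 1)) ++ chunkRev K (l.drop (2 * (K + 1))) := by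
  rw [chunkRev]
  simp only [h, dite_false]
  rw [take_revSeg]

def AcoreLoop (K : Nat) (l : List Char) : List Char :=
  (PySem.List.pyRange 0 ((l.length / (K + 1) : Nat) : Int) 1).foldl
    (fun acc i => if PySem.Int.mod i 2 == 0 then
        pyRevSliceTo acc (((K + 1 : Nat) : Int) * i) (((K + 1 : Nat) : Int) * (i + 1)) else acc) l

def Acore (K : Nat) (l : List Char) : List Char :=
  if (l.length / (K + 1)) % 2 == 0 then
    pyRevSliceFrom (AcoreLoop K l) (((l.length / (K + 1) : Nat) : Int) * ((K + 1 : Nat) : Int))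
  else AcoreLoop K l

lemma op_zero (K : Nat) (l : List Char) :
    pyRevSliceTo l (((K + 1 : Nat) : Int) * 0) (((K + 1 : Nat) : Int) * (0 + 1)) = revSeg (K + 1) l := by
  rw [show ((K + 1 : Nat) : Int) * 0 = (0 : Int) by ring,
      show ((K + 1 : Nat) : Int) * ((0 : Int) + 1) = (0 : Int) + ((K + 1 : Nat) : Int) by ring,
      op_to_int l 0 le_rfl (K + 1)]
  simp

lemma LA (K : Nat) (n : Nat) : ∀ (l : List Char), l.length = n → Acore K l = chunkRev K l := by
  induction n using Nat.strong_induction_on with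
  | _ n ih =>
    intro l hl
    have hKpos : 0 < K + 1 := Nat.succ_pos K
    have hmlt : l.length % (K + 1) < K + 1 := Nat.mod_lt _ hKpos
    unfold Acore AcoreLoop
    by_cases hq0 : l.length / (K + 1) = 0
    · have hsmall : l.length < K + 1 := by
        by_contra hcon
        rw [not_lt] at hcon
        have h1 : 1 ≤ l.length / (K + 1) := (Nat.one_le_div_iff hKpos).mpr hcon
        rw [hq0] at h1
        exact absurd h1 (by norm_num)
      rw [hq0, show (((0 : Nat)) : Int) = (0 : Int) by norm_num,
          pyRange_pos_nil 0 0 1 (by norm_num) le_rfl, List.foldl_nil,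
          if_pos (show ((0 : Nat) % 2 == 0) = true from by decide),
          show (0 : Int) * ((K + 1 : Nat) : Int) = (0 : Int) by ring,
          op_from_int l 0 le_rfl,
          show (0 : Int).toNat = 0 from rfl, List.take_zero, List.drop_zero, List.nil_append,
          chunkRev_small K l (by omega)]
      unfold revSeg
      rw [List.take_of_length_le (by omega), List.drop_eq_nil_of_le (by omega), List.append_nil]
    · by_cases hq1 : l.length / (K + 1) = 1
      · have hlow : K + 1 ≤ l.length := (Nat.one_le_div_iff hKpos).mp (le_of_eq hq1.symm)
        have hhigh : l.length < 2 * (K + 1) := by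
          have h2 : l.length / (K + 1) < 2 := by rw [hq1]; norm_num
          have := (Nat.div_lt_iff_lt_mul hKpos).mp h2
          omega
        rw [hq1, if_neg (show ¬ ((1 : Nat) % 2 == 0) = true from by decide),
            show (((1 : Nat)) : Int) = (0 : Int) + 1 by norm_num,
            PySem.List.pyRange_one_singleton]
        simp only [List.foldl_cons, List.foldl_nil]
        rw [if_pos (show (PySem.Int.mod 0 2 == 0) = true from by decide), op_zero]
        exact (chunkRev_small K l (by omega)).symm
      · have hq2 : 2 ≤ l.length / (K + 1) := by
          rcases Nat.lt_or_ge (l.length / (K + 1)) 2 with h | h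
          · rcases Nat.eq_or_lt_of_le (Nat.le_of_lt_succ h) with h' | h'
            · exact absurd h' hq1
            · exact absurd (Nat.lt_one_iff.mp h') hq0
          · exact h
        have hbig : 2 * (K + 1) ≤ l.length := (Nat.le_div_iff_mul_le hKpos).mp hq2
        have hne : l ≠ [] := by
          intro hEq
          rw [hEq] at hbig
          simp only [List.length_nil] at hbig
          omega
        obtain ⟨d, hd⟩ : ∃ d, l.length / (K + 1) = d + 2 :=
          ⟨l.length / (K + 1) - 2, (Nat.sub_add_cancel hq2).symm⟩
        have hdm : (K + 1) * (d + 2) + l.length % (K + 1) = l.length := by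
          rw [← hd]; exact Nat.div_add_mod _ _
        rw [Nat.mul_add] at hdm
        rw [hd]
        rw [pyRange_pos_cons 0 ((d + 2 : Nat) : Int) 1 (by norm_num) (by push_cast; omega),
            pyRange_pos_cons (0 + 1) ((d + 2 : Nat) : Int) 1 (by norm_num) (by push_cast; omega)]
        simp only [List.foldl_cons]
        rw [if_pos (show (PySem.Int.mod 0 2 == 0) = true from by decide), op_zero,
            if_neg (show ¬ (PySem.Int.mod (0 + 1) 2 == 0) = true from by decide)]
        have hrange : PySem.List.pyRange (0 + 1 + 1) ((d + 2 : Nat) : Int) 1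
            = (PySem.List.pyRange 0 ((d : Nat) : Int) 1).map (fun x => 2 + x) := by
          have h := pyRange_shift 2 0 ((d : Nat) : Int) 1 (by norm_num)
          rw [zero_add, show ((d : Nat) : Int) + 2 = ((d + 2 : Nat) : Int) by push_cast; ring] at h
          rw [show (0 + 1 + 1 : Int) = 2 by norm_num]
          exact h
        rw [hrange, List.foldl_map]
        have hfun : (fun (acc : List Char) (x : Int) =>
              if PySem.Int.mod (2 + x) 2 == 0 then
                pyRevSliceTo acc (((K + 1 : Nat) : Int) * (2 + x)) (((K + 1 : Nat) : Int) * (2 + x + 1)) else acc)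
            = fun (acc : List Char) (j : Int) =>
              if (fun (j : Int) => PySem.Int.mod j 2 == 0) j then
                pyRevSliceTo acc (((2 * (K + 1) : Nat) : Int) + (fun (j : Int) => ((K + 1 : Nat) : Int) * j) j)
                  (((2 * (K + 1) : Nat) : Int) + (fun (j : Int) => ((K + 1 : Nat) : Int) * j) j + ((K + 1 : Nat) : Int))
              else acc := by
          funext acc j
          have hm : PySem.Int.mod (2 + j) 2 = PySem.Int.mod j 2 := by
            rw [PySem.Int.mod_eq_emod_of_pos (by norm_num), PySem.Int.mod_eq_emod_of_pos (by norm_num)]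
            omega
          simp only [hm]
          by_cases hP : (PySem.Int.mod j 2 == 0) = true
          · rw [if_pos hP, if_pos hP]
            congr 1 <;> push_cast <;> ring
          · rw [if_neg hP, if_neg hP]
        rw [hfun]
        have hlen1 : (revSeg (K + 1) l).length = l.length := by
          unfold revSeg
          rw [List.length_append, List.length_reverse, List.length_take, List.length_drop]
          omega
        have hTD : revSeg (K + 1) l
            = (revSeg (K + 1) l).take (2 * (K + 1)) ++ (revSeg (K + 1) l).drop (2 * (K + 1)) :=
          (List.take_append_drop _ _).symm
        rw [hTD,
            fold_shift_gen (K + 1) (2 * (K + 1))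
              (fun (j : Int) => PySem.Int.mod j 2 == 0)
              (fun (j : Int) => ((K + 1 : Nat) : Int) * j)
              (PySem.List.pyRange 0 ((d : Nat) : Int) 1)
              (by intro j hj
                  exact mul_nonneg (by positivity) (PySem.List.mem_pyRange_one.mp hj).1)
              _ _ (by rw [List.length_take, hlen1]; omega),
            drop_revSeg]
        set v : List Char := l.drop (2 * (K + 1)) with hv
        have hvlen : v.length = l.length - 2 * (K + 1) := by rw [hv, List.length_drop]
        have e : l.length - 2 * (K + 1) = (K + 1) * d + l.length % (K + 1) := by omega
        have hvdiv : v.length / (K + 1) = d := by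
          rw [hvlen, e, Nat.mul_add_div hKpos, Nat.div_eq_of_lt hmlt, Nat.add_zero]
        have hrec := ih (l.length - 2 * (K + 1)) (by omega) v hvlen
        rw [chunkRev_step K l hne, ← hv, ← hrec]
        unfold Acore AcoreLoop
        rw [hvdiv]
        have hfun2 : (fun (acc : List Char) (j : Int) =>
              if PySem.Int.mod j 2 == 0 then
                pyRevSliceTo acc (((K + 1 : Nat) : Int) * j) (((K + 1 : Nat) : Int) * j + ((K + 1 : Nat) : Int))
              else acc)
            = fun (acc : List Char) (i : Int) =>
              if PySem.Int.mod i 2 == 0 then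
                pyRevSliceTo acc (((K + 1 : Nat) : Int) * i) (((K + 1 : Nat) : Int) * (i + 1)) else acc := by
          funext acc j
          by_cases hP : (PySem.Int.mod j 2 == 0) = true
          · rw [if_pos hP, if_pos hP]; congr 1; ring
          · rw [if_neg hP, if_neg hP]
        rw [hfun2]
        have hcond : (((d + 2 : Nat)) % 2 == 0) = ((d : Nat) % 2 == 0) := by
          rw [Nat.add_mod_right]
        rw [hcond]
        by_cases hcase : (((d : Nat) % 2 == 0) = true)
        · rw [if_pos hcase, if_pos hcase,
              show ((d + 2 : Nat) : Int) * ((K + 1 : Nat) : Int)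
                  = ((2 * (K + 1) : Nat) : Int) + ((d : Nat) : Int) * ((K + 1 : Nat) : Int) by
                push_cast; ring]
          exact op_from_shift (2 * (K + 1)) _
            (mul_nonneg (by positivity) (by positivity)) _ _
            (by rw [List.length_take, hlen1]; omega)
        · rw [if_neg hcase, if_neg hcase]

lemma mod_two_beq (q : Nat) : (PySem.Int.mod (q : Int) 2 == 0) = (q % 2 == 0) := by
  rw [show (2 : Int) = ((2 : Nat) : Int) by norm_num, PySem.Int.mod_natCast]
  by_cases h : q % 2 = 0
  · simp [h]
  · rw [show q % 2 = 1 by omega]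
    simp

-- B's per-index gather, over Nat (the bridge lemma connects it to the port's Int arithmetic).
def gIdx (K : Nat) (l : List Char) (i : Nat) : Char :=
  let W := 2 * (K + 1)
  let st := W * (i / W)
  let e := min (st + (K + 1)) l.length
  if i < e then l.getD (st + e - 1 - i) ' ' else l.getD i ' '

lemma getD_drop (l : List Char) (m x : Nat) :
    (l.drop m).getD x ' ' = l.getD (m + x) ' ' := by
  rw [List.getD_eq_getElem?_getD, List.getD_eq_getElem?_getD, List.getElem?_drop]

lemma g_shift (K : Nat) (l : List Char) (j : Nat) (h : 2 * (K + 1) ≤ l.length) :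
    gIdx K l (2 * (K + 1) + j) = gIdx K (l.drop (2 * (K + 1))) j := by
  unfold gIdx
  simp only [List.length_drop]
  have hW : 0 < 2 * (K + 1) := by omega
  have hdiv : (2 * (K + 1) + j) / (2 * (K + 1)) = j / (2 * (K + 1)) + 1 := by
    rw [Nat.add_comm, Nat.add_div_right _ hW]
  rw [hdiv]
  set W := 2 * (K + 1) with hWdef
  set st := W * (j / W) with hst
  have hstW : W * (j / W + 1) = W + st := by rw [hst]; ring
  rw [hstW]
  have hmin : min (W + st + (K + 1)) l.length = W + min (st + (K + 1)) (l.length - W) := by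
    omega
  rw [hmin]
  by_cases hc : j < min (st + (K + 1)) (l.length - W)
  · rw [if_pos (by omega), if_pos hc, getD_drop]
    congr 1
    omega
  · rw [if_neg (by omega), if_neg hc, getD_drop]

lemma head_map (K : Nat) (l : List Char) (t : Nat) (ht : t = min (2 * (K + 1)) l.length) :
    (List.range t).map (gIdx K l) = (revSeg (K + 1) l).take (2 * (K + 1)) := by
  have hlen : (revSeg (K + 1) l).length = l.length := by
    unfold revSeg
    rw [List.length_append, List.length_reverse, List.length_take, List.length_drop]
    omega
  apply List.ext_getElem
  · rw [List.length_map, List.length_range, List.length_take, hlen, ht]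
  · intro i hi1 hi2
    rw [List.length_map, List.length_range] at hi1
    have hiW : i < 2 * (K + 1) := by omega
    have hin : i < l.length := by omega
    rw [List.getElem_map, List.getElem_range, List.getElem_take]
    unfold gIdx revSeg
    simp only [Nat.div_eq_of_lt hiW, Nat.mul_zero, Nat.zero_add]
    set E := min (K + 1) l.length with hE
    by_cases hc : i < E
    · rw [if_pos hc, List.getElem_append_left (by simp; omega)]
      rw [List.getElem_reverse, List.getElem_take]
      rw [List.getD_eq_getElem?_getD]
      have : E - 1 - i < l.length := by omega
      rw [List.getElem?_eq_getElem this]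
      simp only [Option.getD_some]
      congr 1
      simp only [List.length_take]
      omega
    · rw [if_neg hc]
      have hEK : E = K + 1 := by omega
      rw [List.getElem_append_right (by simp at hc ⊢; omega)]
      rw [List.getD_eq_getElem?_getD, List.getElem?_eq_getElem hin]
      simp only [Option.getD_some, List.getElem_drop]
      congr 1
      simp only [List.length_reverse, List.length_take]
      omega

lemma LG (K : Nat) (n : Nat) : ∀ (l : List Char), l.length = n →
    (List.range n).map (gIdx K l) = chunkRev K l := by
  induction n using Nat.strong_induction_on with
  | _ n ih =>
    intro l hl
    by_cases hsmall : n ≤ 2 * (K + 1)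
    · rw [head_map K l n (by omega), chunkRev_small K l (by omega),
          List.take_of_length_le]
      unfold revSeg
      rw [List.length_append, List.length_reverse, List.length_take, List.length_drop]
      omega
    · have hne : l ≠ [] := by
        intro hEq; rw [hEq] at hl; simp at hl; omega
      have hWn : 2 * (K + 1) ≤ l.length := by omega
      rw [show n = 2 * (K + 1) + (n - 2 * (K + 1)) by omega, List.range_add,
          List.map_append, List.map_map]
      have h1 : (List.range (2 * (K + 1))).map (gIdx K l)
          = (revSeg (K + 1) l).take (2 * (K + 1)) :=
        head_map K l (2 * (K + 1)) (by omega)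
      have h2 : (List.range (n - 2 * (K + 1))).map (gIdx K l ∘ (fun j => 2 * (K + 1) + j))
          = chunkRev K (l.drop (2 * (K + 1))) := by
        have hlen2 : (l.drop (2 * (K + 1))).length = n - 2 * (K + 1) := by
          rw [List.length_drop, hl]
        rw [← ih (n - 2 * (K + 1)) (by omega) _ hlen2]
        apply List.map_congr_left
        intro j _
        exact g_shift K l j hWn
      rw [h1, h2, ← chunkRev_step K l hne]

-- ===== VERDICT (by name: the statement is the Claim_ definition above) =====
theorem reverseStr_spec : Claim_equal_reverseStr := by
  unfold Claim_equal_reverseStr Spec_reverseStr Pre_reverseStr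
  intro s k _ hk
  obtain ⟨m, rfl⟩ : ∃ m : Nat, k = ((m + 1 : Nat) : Int) := ⟨k.toNat - 1, by omega⟩
  simp only [reverseStr, reverseStr_alt]
  congr 1
  -- A side rewrites
  rw [PySem.Int.floordiv_natCast s.toList.length (m + 1), mod_two_beq]
  have hA := LA m s.toList.length s.toList rfl
  unfold Acore AcoreLoop at hA
  rw [hA]
  -- B side
  rw [PySem.List.pyRange_one, List.map_map]
  have hcnt : (((s.toList.length : Int) - 0)).toNat = s.toList.length := by omega
  rw [hcnt, ← LG m s.toList.length s.toList rfl]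
  apply List.map_congr_left
  intro j hj
  simp only [Function.comp, zero_add]
  -- bridge: the port's Int arithmetic at index ↑j equals gIdx m s.toList j
  set l := s.toList with hldef
  have hw : (2 : Int) * ((m + 1 : Nat) : Int) = ((2 * (m + 1) : Nat) : Int) := by push_cast; ring
  rw [hw, PySem.Int.floordiv_natCast]
  have hst : ((2 * (m + 1) : Nat) : Int) * ((j / (2 * (m + 1)) : Nat) : Int)
      = ((2 * (m + 1) * (j / (2 * (m + 1))) : Nat) : Int) := by push_cast; ring
  rw [hst]
  set S : Nat := 2 * (m + 1) * (j / (2 * (m + 1))) with hSdef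
  have he : min (((S : Nat) : Int) + ((m + 1 : Nat) : Int)) ((l.length : Int))
      = ((min (S + (m + 1)) l.length : Nat) : Int) := by
    push_cast [Nat.cast_min]
    rfl
  rw [he]
  set E : Nat := min (S + (m + 1)) l.length with hEdef
  unfold gIdx
  simp only []
  rw [← hSdef, ← hEdef]
  by_cases hc : j < E
  · rw [if_pos hc, if_pos (show ((j : Nat) : Int) < ((E : Nat) : Int) from by exact_mod_cast hc)]
    have hidx : ((S : Nat) : Int) + ((E : Nat) : Int) - 1 - ((j : Nat) : Int)
        = ((S + E - 1 - j : Nat) : Int) := by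
      have : j + 1 ≤ E := hc
      push_cast
      omega
    rw [hidx, PySem.List.pyGetD_natCast]
  · rw [if_neg hc, if_neg (show ¬ ((j : Nat) : Int) < ((E : Nat) : Int) from by exact_mod_cast hc),
        PySem.List.pyGetD_natCast]
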